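-- pv_equiv track=rewrite | github.com/kaust-cs249-2020/fady-bedir | chapter3/ch386eulepath.py | find_unbalanced_nodes
-- ===== SOURCE A (Python) =====
-- def find_unbalanced_nodes(graph):
--     start = 0
--     end = 0
--     keys = list(graph.keys())        #make a list of all nodes
--     for values in graph.values():
--         for value in values:
--             if value not in keys:
--                 keys.append(value)  #make sure all nodes are on the list
--     for key in keys:
--         if key not in graph:    #if a node is not a key in the graph dict
--             outgoing = 0        #then it has no outgoing edges
--         else:
--             outgoing = len(graph[key])   #if it's a key then get the number of its outgoing edges
--         incoming = 0
--         for values in graph.values():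
--             if key in values:           #if a node is in both keys and values of the graph dict
--                 incoming += 1           #then add 1 to its incoming edges number
--         if outgoing > incoming:
--             start = key                 #if more edges are leaving than entering a node, this is the start of the path
--         elif incoming > outgoing:
--             end = key                   # if more edges are enterin than leving a node, this is the end of the path
--     return start, end
-- ===== SOURCE B (Python) =====
-- def find_unbalanced_nodes(graph):
--     # One pass builds the node order and an incoming-degree dict (membership per
--     # source list, as A counts it); then a single scan over the nodes.
--     keys = list(graph)
--     seen = set(keys)
--     indeg = {}
--     for values in graph.values():
--         for v in values:
--             if v not in seen:
--                 seen.add(v)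
--                 keys.append(v)
--         for v in dict.fromkeys(values):
--             indeg[v] = indeg.get(v, 0) + 1
--     start = 0
--     end = 0
--     for key in keys:
--         out = len(graph[key]) if key in graph else 0
--         inc = indeg.get(key, 0)
--         if out > inc:
--             start = key
--         elif inc > out:
--             end = key
--     return start, end
-- ===== Notes on version B (the rewrite author's own statement) =====
-- stated objective: faster
-- what changed: A rescans the whole node list for membership and all value lists per node (O(V*E)); B makes one pass over the graph building the node order with a set and an incoming-degree dict (counting per-source membership like A), then a single scan over the nodes.
import Mathlib
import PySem

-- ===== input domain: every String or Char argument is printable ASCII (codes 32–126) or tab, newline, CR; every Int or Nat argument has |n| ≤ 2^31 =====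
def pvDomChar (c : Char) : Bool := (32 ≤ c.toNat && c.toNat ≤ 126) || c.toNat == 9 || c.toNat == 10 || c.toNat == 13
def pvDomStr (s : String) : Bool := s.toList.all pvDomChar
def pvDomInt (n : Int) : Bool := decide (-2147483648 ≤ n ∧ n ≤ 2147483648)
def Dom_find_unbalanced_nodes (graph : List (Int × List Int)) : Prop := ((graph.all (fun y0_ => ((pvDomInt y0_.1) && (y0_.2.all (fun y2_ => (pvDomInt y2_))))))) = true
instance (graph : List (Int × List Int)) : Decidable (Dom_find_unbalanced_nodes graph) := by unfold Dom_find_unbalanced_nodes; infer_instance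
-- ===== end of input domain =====

-- B replaces A's quadratic per-key scans by one pass building an incoming-degree dict and a seen-set,
-- then a single scan over the node order; objective: faster (asymptotic).


-- ===== PORT A =====
-- dict access 'len(graph[key]) if key in graph else 0' (first matching key; keys are distinct, see Pre_)
def pvOutDeg (graph : List (Int × List Int)) (key : Int) : Int :=
  match graph.find? (fun p => p.1 == key) with
  | some p => p.2.length
  | none => 0
-- graph is a Python dict: the assoc list holds its items in insertion order (keys distinct, see Pre_).
def find_unbalanced_nodes (graph : List (Int × List Int)) : Int × Int :=
  -- keys = list(graph.keys()); for values in graph.values(): for value in values: if value not in keys: keys.append(value)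
  let keys := graph.foldl
    (fun ks p => p.2.foldl (fun ks v => if ks.contains v then ks else ks ++ [v]) ks)
    (graph.map Prod.fst)
  -- for key in keys: …
  keys.foldl (fun (se : Int × Int) key =>
    let outgoing : Int := pvOutDeg graph key
    let incoming : Int := graph.foldl (fun acc p => if p.2.contains key then acc + 1 else acc) 0
    if outgoing > incoming then (key, se.2)
    else if incoming > outgoing then (se.1, key)
    else se) (0, 0)

-- ===== PORT B =====
def find_unbalanced_nodes_alt (graph : List (Int × List Int)) : Int × Int :=
  let keys0 := graph.map Prod.fst
  -- one pass: extend (keys, seen) with unseen values, and count per-source membership in indeg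
  let st := graph.foldl
    (fun (st : List Int × PySem.Set Int × PySem.Dict Int Int) p =>
      let ks := p.2.foldl
        (fun (ks : List Int × PySem.Set Int) v =>
          if PySem.Set.contains ks.2 v then ks else (ks.1 ++ [v], PySem.Set.add ks.2 v))
        (st.1, st.2.1)
      let indeg := (PySem.List.dedup p.2).foldl
        (fun (d : PySem.Dict Int Int) v => d.insert v (d.getD v 0 + 1)) st.2.2
      (ks.1, ks.2, indeg))
    (keys0, PySem.Set.ofList keys0, PySem.Dict.empty)
  st.1.foldl (fun (se : Int × Int) key =>
    let outdeg : Int := pvOutDeg graph key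
    let inc : Int := st.2.2.getD key 0
    if outdeg > inc then (key, se.2)
    else if inc > outdeg then (se.1, key)
    else se) (0, 0)

-- ===== PRECONDITION & SPEC =====
-- Pre_ only fixes the representation: a Python dict cannot have duplicate keys, so the assoc list's keys are distinct.
def Pre_find_unbalanced_nodes (graph : List (Int × List Int)) : Prop := (graph.map Prod.fst).Nodup
instance (graph : List (Int × List Int)) : Decidable (Pre_find_unbalanced_nodes graph) := by unfold Pre_find_unbalanced_nodes; infer_instance
def pvWitness_find_unbalanced_nodes : (List (Int × List Int)) := [(0, [1, 2]), (1, [2]), (2, [0])]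

def Spec_find_unbalanced_nodes (graph : List (Int × List Int)) (out : Int × Int) : Prop := out = find_unbalanced_nodes_alt graph
instance (graph : List (Int × List Int)) (out : Int × Int) : Decidable (Spec_find_unbalanced_nodes graph out) := by unfold Spec_find_unbalanced_nodes; infer_instance

-- ===== CLAIM (what is proved, stated in full; the proofs are below) =====
def Claim_equal_find_unbalanced_nodes : Prop := ∀ (graph : List (Int × List Int)), Dom_find_unbalanced_nodes graph → Pre_find_unbalanced_nodes graph → Spec_find_unbalanced_nodes graph (find_unbalanced_nodes graph)

-- ===== LEMMAS AND PROOFS =====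

-- B's inner (keys, seen) fold, started with both components equal, keeps them equal to A's keys fold.
lemma pv_pair_fold (vs ks : List Int) :
    vs.foldl (fun (ks : List Int × PySem.Set Int) v =>
        if PySem.Set.contains ks.2 v then ks else (ks.1 ++ [v], PySem.Set.add ks.2 v)) (ks, ks)
      = (vs.foldl (fun ks v => if ks.contains v then ks else ks ++ [v]) ks,
         vs.foldl (fun ks v => if ks.contains v then ks else ks ++ [v]) ks) := by
  induction vs generalizing ks with
  | nil => rfl
  | cons v vs ih =>
      by_cases h : v ∈ ks
      · simpa [PySem.Set.contains, PySem.Set.add, h] using ih ks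
      · simpa [PySem.Set.contains, PySem.Set.add, h] using ih (ks ++ [v])

-- B's outer triple fold decomposes into A's keys fold (twice) and the indeg fold.
lemma pv_triple_fold (g : List (Int × List Int)) (ks : List Int) (d : PySem.Dict Int Int) :
    g.foldl
      (fun (st : List Int × PySem.Set Int × PySem.Dict Int Int) p =>
        let kss := p.2.foldl
          (fun (kss : List Int × PySem.Set Int) v =>
            if PySem.Set.contains kss.2 v then kss else (kss.1 ++ [v], PySem.Set.add kss.2 v))
          (st.1, st.2.1)
        let indeg := (PySem.List.dedup p.2).foldl
          (fun (d : PySem.Dict Int Int) v => d.insert v (d.getD v 0 + 1)) st.2.2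
        (kss.1, kss.2, indeg))
      (ks, ks, d)
      = (g.foldl (fun ks p => p.2.foldl (fun ks v => if ks.contains v then ks else ks ++ [v]) ks) ks,
         g.foldl (fun ks p => p.2.foldl (fun ks v => if ks.contains v then ks else ks ++ [v]) ks) ks,
         g.foldl (fun d p => (PySem.List.dedup p.2).foldl
           (fun (d : PySem.Dict Int Int) v => d.insert v (d.getD v 0 + 1)) d) d) := by
  induction g generalizing ks d with
  | nil => rfl
  | cons p g ih =>
      simp only [List.foldl_cons, pv_pair_fold]
      exact ih _ _

-- the indeg dict counts, for each node, the source lists that contain it (A's 'incoming' loop).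
lemma pv_indeg_count (g : List (Int × List Int)) (d : PySem.Dict Int Int) (key : Int) :
    (g.foldl (fun d p => (PySem.List.dedup p.2).foldl
        (fun (d : PySem.Dict Int Int) v => d.insert v (d.getD v 0 + 1)) d) d).getD key 0
      = d.getD key 0 + g.foldl (fun acc p => if p.2.contains key then acc + 1 else acc) 0 := by
  induction g generalizing d with
  | nil => simp
  | cons p g ih =>
      simp only [List.foldl_cons, ih, PySem.Dict.getD_foldl_insert_add_one,
        PySem.List.foldl_if_add_one]
      have hc : ((PySem.List.dedup p.2).count key : Int) = if p.2.contains key then 1 else 0 := by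
        by_cases h : key ∈ p.2
        · rw [List.count_eq_one_of_mem (PySem.List.nodup_dedup p.2)
            ((PySem.List.mem_dedup p.2 key).mpr h)]
          simp [h]
        · rw [List.count_eq_zero_of_not_mem (fun hm => h ((PySem.List.mem_dedup p.2 key).mp hm))]
          simp
          omega
      rw [hc]
      by_cases h : p.2.contains key <;> simp <;> ring

-- building a set from distinct elements, none already present, appends them in order
lemma pv_foldl_add_nodup (xs s : List Int) (hnd : xs.Nodup) (hdisj : ∀ x ∈ xs, x ∉ s) :
    xs.foldl PySem.Set.add s = s ++ xs := by
  induction xs generalizing s with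
  | nil => simp
  | cons x xs ih =>
      simp only [List.nodup_cons] at hnd
      have hx : x ∉ s := hdisj x (by simp)
      simp only [List.foldl_cons, PySem.Set.add, PySem.Set.contains]
      rw [if_neg (by simpa using hx)]
      rw [ih (s ++ [x]) hnd.2 (fun y hy hmem => by
        rcases List.mem_append.mp hmem with h | h
        · exact hdisj y (by simp [hy]) h
        · exact hnd.1 ((List.mem_singleton.mp h) ▸ hy))]
      simp

-- seen = set(keys) is keys itself when the keys are distinct
lemma pv_ofList_nodup (xs : List Int) (h : xs.Nodup) : PySem.Set.ofList xs = xs := by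
  rw [PySem.Set.ofList_eq_foldl, pv_foldl_add_nodup xs [] h (by simp)]
  simp

-- ===== VERDICT (by name: the statement is the Claim_ definition above) =====
theorem find_unbalanced_nodes_spec : Claim_equal_find_unbalanced_nodes := by
  intro graph _ hpre
  unfold Spec_find_unbalanced_nodes find_unbalanced_nodes find_unbalanced_nodes_alt
  simp only [pv_ofList_nodup _ hpre, pv_triple_fold, pv_indeg_count]
  simp
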